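-- pv_equiv track=rewrite | github.com/wasifsarwar/MindPulse | MindPulse/src/server/prompts/templates.py | create_rag_context
-- ===== SOURCE A (Python) =====
-- from typing import List, Dict, Any
--
-- def create_rag_context(examples: List[Dict[str, Any]], max_length: int = 2000) -> str:
--     """
--     Create a RAG (Retrieval-Augmented Generation) context from examples.
--
--     Args:
--         examples: List of relevant examples from datasets
--         max_length: Maximum character length for context
--
--     Returns:
--         Formatted context string
--     """
--     context_parts = []
--     current_length = 0
--
--     for i, example in enumerate(examples, 1):
--         example_text = f"\n--- Example {i} ---\n"
--
--         if "Context" in example and "Response" in example: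
--             example_text += f"User: {example['Context']}\n"
--             example_text += f"Counselor: {example['Response']}\n"
--         elif "text" in example and "label" in example:
--             example_text += f"Text: {example['text']}\n"
--             example_text += f"Sentiment: {example['label']}\n"
--         else:
--             example_text += str(example) + "\n"
--
--         if current_length + len(example_text) > max_length:
--             break
--
--         context_parts.append(example_text)
--         current_length += len(example_text)
--
--     return "".join(context_parts)
-- ===== SOURCE B (Python) =====
-- from typing import List, Dict, Any
--
-- def _format_example(i: int, example: Dict[str, Any]) -> str:
--     header = f"\n--- Example {i} ---\n"
--     if "Context" in example and "Response" in example: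
--         return header + f"User: {example['Context']}\n" + f"Counselor: {example['Response']}\n"
--     elif "text" in example and "label" in example:
--         return header + f"Text: {example['text']}\n" + f"Sentiment: {example['label']}\n"
--     else:
--         return header + str(example) + "\n"
--
-- def create_rag_context(examples: List[Dict[str, Any]], max_length: int = 2000) -> str:
--     parts = [_format_example(i, ex) for i, ex in enumerate(examples, 1)]
--     totals = []
--     running = 0
--     for p in parts:
--         running += len(p)
--         totals.append(running)
--     k = 0
--     while k < len(parts) and totals[k] <= max_length:
--         k += 1
--     return "".join(parts[:k])
-- ===== Notes on version B (the rewrite author's own statement) =====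
-- stated objective: simpler
-- what changed: A's single interleaved loop (format, test running length, break, append) is replaced by a staged decomposition: format every example with a comprehension, compute cumulative lengths in a second pass, find the cutoff index with a while loop, and join that prefix.
import Mathlib
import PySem

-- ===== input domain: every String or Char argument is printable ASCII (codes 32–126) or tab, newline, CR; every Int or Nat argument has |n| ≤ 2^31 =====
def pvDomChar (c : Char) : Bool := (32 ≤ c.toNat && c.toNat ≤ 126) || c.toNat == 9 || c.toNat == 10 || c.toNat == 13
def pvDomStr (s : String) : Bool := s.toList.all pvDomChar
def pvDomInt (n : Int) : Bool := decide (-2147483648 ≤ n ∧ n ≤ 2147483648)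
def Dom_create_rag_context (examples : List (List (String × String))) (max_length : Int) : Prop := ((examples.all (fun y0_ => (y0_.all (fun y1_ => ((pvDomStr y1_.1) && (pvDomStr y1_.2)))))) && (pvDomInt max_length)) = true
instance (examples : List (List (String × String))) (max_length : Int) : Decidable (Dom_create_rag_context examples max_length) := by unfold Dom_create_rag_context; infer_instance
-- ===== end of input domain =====

-- B separates formatting from length-bounded prefix selection (format all, prefix sums, cutoff, join)
-- instead of A's single interleaved accumulate-and-break loop; objective: simpler decomposition, same cost.

-- ===== PORT A =====
-- shared port of the Python BUILTINS repr(str) / str(dict) (both Pythons call str(exd)):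
-- exact for printable-ASCII + tab/newline/CR strings (Python repr escapes \, the chosen quote, \t, \n, \r
-- and prefers single quotes unless the string contains ' but not ")
def pyReprChar (q : Char) (c : Char) : String :=
  if c = '\\' then "\\\\"
  else if c = q then "\\".push q
  else if c = '\t' then "\\t"
  else if c = '\n' then "\\n"
  else if c = '\r' then "\\r"
  else String.singleton c

def pyReprStr (s : String) : String :=
  let q := if s.toList.contains '\'' ∧ ¬ s.toList.contains '"' then '"' else '\''
  String.singleton q ++ String.join (s.toList.map (pyReprChar q)) ++ String.singleton q

-- str(exd) for a dict[str, str]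
def pyStrDict (d : List (String × String)) : String :=
  "{" ++ String.intercalate ", " (d.map (fun kv => pyReprStr kv.1 ++ ": " ++ pyReprStr kv.2)) ++ "}"

-- exd[k] (keys are unique in a Python dict: first match)
def dGet (d : List (String × String)) (k : String) : String :=
  (((d.find? (fun kv => kv.1 == k)).map Prod.snd).getD "")

def dHas (d : List (String × String)) (k : String) : Bool :=
  d.any (fun kv => kv.1 == k)

-- the body of A's loop building example_text (A builds it by += in exactly this order)
def aFormat (i : Nat) (exd : List (String × String)) : String :=
  let example_text := "\n--- Example " ++ PySem.Int.toStr (i : Int) ++ " ---\n"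
  if dHas exd "Context" && dHas exd "Response" then
    example_text ++ ("User: " ++ dGet exd "Context" ++ "\n") ++ ("Counselor: " ++ dGet exd "Response" ++ "\n")
  else if dHas exd "text" && dHas exd "label" then
    example_text ++ ("Text: " ++ dGet exd "text" ++ "\n") ++ ("Sentiment: " ++ dGet exd "label" ++ "\n")
  else
    example_text ++ (pyStrDict exd ++ "\n")

-- A's for-loop with break: state = (i, current_length, context_parts)
def aLoop (max_length : Int) : List (List (String × String)) → Nat → Int → List String → String
  | [], _, _, context_parts => String.join context_parts
  | exd :: rest, i, current_length, context_parts =>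
      let example_text := aFormat i exd
      if current_length + (example_text.length : Int) > max_length then String.join context_parts
      else aLoop max_length rest (i + 1) (current_length + (example_text.length : Int))
             (context_parts ++ [example_text])

def create_rag_context (examples : List (List (String × String))) (max_length : Int) : String :=
  aLoop max_length examples 1 0 []

-- ===== PORT B =====
-- _format_example from Source B
def bFormat (i : Nat) (exd : List (String × String)) : String :=
  let header := "\n--- Example " ++ PySem.Int.toStr (i : Int) ++ " ---\n"
  if dHas exd "Context" && dHas exd "Response" then
    header ++ ("User: " ++ dGet exd "Context" ++ "\n") ++ ("Counselor: " ++ dGet exd "Response" ++ "\n")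
  else if dHas exd "text" && dHas exd "label" then
    header ++ ("Text: " ++ dGet exd "text" ++ "\n") ++ ("Sentiment: " ++ dGet exd "label" ++ "\n")
  else
    header ++ (pyStrDict exd ++ "\n")

-- [_format_example(i, ex) for i, ex in enumerate(examples, 1)]
def bParts (i : Nat) : List (List (String × String)) → List String
  | [] => []
  | ex :: rest => bFormat i ex :: bParts (i + 1) rest

-- the prefix-sum loop (totals)
def bAccum (running : Int) : List Int → List Int
  | [] => []
  | x :: xs => (running + x) :: bAccum (running + x) xs

-- the while loop finding the cutoff k
def bCut (max_length : Int) : List Int → Nat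
  | [] => 0
  | t :: ts => if t ≤ max_length then bCut max_length ts + 1 else 0

def create_rag_context_alt (examples : List (List (String × String))) (max_length : Int) : String :=
  let parts := bParts 1 examples
  let totals := bAccum 0 (parts.map (fun p => (p.length : Int)))
  let k := bCut max_length totals
  String.join (parts.take k)

-- ===== PRECONDITION & SPEC =====
def Spec_create_rag_context (examples : List (List (String × String))) (max_length : Int) (out : String) : Prop := out = create_rag_context_alt examples max_length
instance (examples : List (List (String × String))) (max_length : Int) (out : String) : Decidable (Spec_create_rag_context examples max_length out) := by unfold Spec_create_rag_context; infer_instance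

-- ===== CLAIM (what is proved, stated in full; the proofs are below) =====
def Claim_equal_create_rag_context : Prop := ∀ (examples : List (List (String × String))) (max_length : Int), Dom_create_rag_context examples max_length → Spec_create_rag_context examples max_length (create_rag_context examples max_length)

-- ===== LEMMAS AND PROOFS =====
theorem aFormat_eq_bFormat (i : Nat) (exd : List (String × String)) :
    aFormat i exd = bFormat i exd := rfl

theorem aLoop_eq (max_length : Int) :
    ∀ (xs : List (List (String × String))) (i : Nat) (cur : Int) (parts : List String),
      aLoop max_length xs i cur parts =
        String.join (parts ++ (bParts i xs).take
          (bCut max_length (bAccum cur ((bParts i xs).map (fun p => (p.length : Int)))))) := by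
  intro xs
  induction xs with
  | nil => intro i cur parts; simp [aLoop, bParts, bAccum, bCut]
  | cons ex rest ih =>
      intro i cur parts
      simp only [aLoop, bParts, List.map_cons, bAccum, bCut, aFormat_eq_bFormat]
      by_cases h : cur + ((bFormat i ex).length : Int) > max_length
      · rw [if_pos h, if_neg (by omega)]
        simp
      · rw [if_neg h, if_pos (by omega), ih (i + 1) (cur + ((bFormat i ex).length : Int)) (parts ++ [bFormat i ex])]
        simp [List.take_succ_cons, List.append_assoc]

-- ===== VERDICT (by name: the statement is the Claim_ definition above) =====
theorem create_rag_context_spec : Claim_equal_create_rag_context := by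
  intro examples max_length _
  unfold Spec_create_rag_context create_rag_context create_rag_context_alt
  rw [aLoop_eq]
  simp
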